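-- pv_equiv track=rewrite | github.com/Klastrovanie/4CM-MoE | compare_all_2k.py | augment_sentences
-- ===== SOURCE A (Python) =====
-- TEMPLATES = [
--     "{}",
--     "Could you help me with this: {}",
--     "I need to understand: {}",
--     "Please explain: {}",
--     "Can you tell me about: {}",
--     "What is the best way to handle: {}",
--     "I am trying to learn about: {}",
--     "Help me figure out: {}",
--     "I have a question about: {}",
--     "I would like to know more about: {}",
--     "Can you walk me through: {}",
--     "I need some advice on: {}",
--     "What do you think about: {}",
--     "How should I approach: {}",
--     "Give me guidance on: {}",
--     "I am confused about: {}",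
--     "Can you clarify: {}",
--     "I want to learn: {}",
--     "What is the best approach for: {}",
--     "I need help understanding: {}",
--     "Could you break down: {}",
--     "I am struggling with: {}",
--     "What should I know about: {}",
--     "Help me understand: {}",
--     "I need a clear explanation of: {}",
-- ]
--
-- def augment_sentences(base_sentences, target=500):
--     """augmentation"""
--     augmented = []
--     while len(augmented) < target:
--         for sent in base_sentences:
--             for tmpl in TEMPLATES:
--                 augmented.append(tmpl.format(sent))
--                 if len(augmented) >= target:
--                     break
--             if len(augmented) >= target:
--                 break
--     return augmented[:target]
-- ===== SOURCE B (Python) =====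
-- TEMPLATES = [
--     "{}",
--     "Could you help me with this: {}",
--     "I need to understand: {}",
--     "Please explain: {}",
--     "Can you tell me about: {}",
--     "What is the best way to handle: {}",
--     "I am trying to learn about: {}",
--     "Help me figure out: {}",
--     "I have a question about: {}",
--     "I would like to know more about: {}",
--     "Can you walk me through: {}",
--     "I need some advice on: {}",
--     "What do you think about: {}",
--     "How should I approach: {}",
--     "Give me guidance on: {}",
--     "I am confused about: {}",
--     "Can you clarify: {}",
--     "I want to learn: {}",
--     "What is the best approach for: {}",
--     "I need help understanding: {}",
--     "Could you break down: {}",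
--     "I am struggling with: {}",
--     "What should I know about: {}",
--     "Help me understand: {}",
--     "I need a clear explanation of: {}",
-- ]
--
-- def augment_sentences(base_sentences, target=500):
--     """Build the template x sentence table once, then tile it and slice."""
--     combos = [tmpl.format(sent) for sent in base_sentences for tmpl in TEMPLATES]
--     if target <= 0 or not combos:
--         return []
--     reps = -(-target // len(combos))
--     return (combos * reps)[:target]
-- ===== Notes on version B (the rewrite author's own statement) =====
-- stated objective: simpler
-- what changed: Replaces the two nested break-guarded loops inside a while with a one-shot comprehension that builds the base x template table, a ceiling-division replication count, and a single slice.
import Mathlib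
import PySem

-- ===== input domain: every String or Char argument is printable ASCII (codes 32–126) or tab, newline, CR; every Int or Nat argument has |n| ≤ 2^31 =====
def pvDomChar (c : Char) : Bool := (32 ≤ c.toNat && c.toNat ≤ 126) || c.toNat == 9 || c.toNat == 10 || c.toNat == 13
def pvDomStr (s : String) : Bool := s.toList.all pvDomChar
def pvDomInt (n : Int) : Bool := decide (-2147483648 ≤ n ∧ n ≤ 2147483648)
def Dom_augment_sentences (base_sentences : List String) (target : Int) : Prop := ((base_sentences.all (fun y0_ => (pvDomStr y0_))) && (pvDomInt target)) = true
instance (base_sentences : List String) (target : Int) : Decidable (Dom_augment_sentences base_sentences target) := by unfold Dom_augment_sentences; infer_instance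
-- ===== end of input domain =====

-- B replaces A's while loop with two nested break-guarded for loops by: build the base×template
-- table once, tile it ceil(target/len) times, slice to target (objective: simpler).

-- ===== PORT A =====
-- Every TEMPLATES entry is "<prefix>{}" with no other brace, so tmpl.format(sent) = prefix ++ sent
-- exactly; pvTemplatePrefixes stores the prefixes in order.
def pvTemplatePrefixes : List String :=
  ["", "Could you help me with this: ", "I need to understand: ", "Please explain: ",
   "Can you tell me about: ", "What is the best way to handle: ", "I am trying to learn about: ",
   "Help me figure out: ", "I have a question about: ", "I would like to know more about: ",
   "Can you walk me through: ", "I need some advice on: ", "What do you think about: ",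
   "How should I approach: ", "Give me guidance on: ", "I am confused about: ",
   "Can you clarify: ", "I want to learn: ", "What is the best approach for: ",
   "I need help understanding: ", "Could you break down: ", "I am struggling with: ",
   "What should I know about: ", "Help me understand: ", "I need a clear explanation of: "]

def pvFmt (tmpl sent : String) : String := tmpl ++ sent

-- inner 'for tmpl in TEMPLATES: append; if len >= target: break'
def pvForTemplates (target : Int) (sent : String) : List String → List String → List String
  | aug, [] => aug
  | aug, t :: ts =>
    let aug' := aug ++ [pvFmt t sent]
    if target ≤ (aug'.length : Int) then aug' else pvForTemplates target sent aug' ts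

-- outer 'for sent in base_sentences: …; if len >= target: break'
def pvForSents (target : Int) : List String → List String → List String
  | aug, [] => aug
  | aug, s :: ss =>
    let aug' := pvForTemplates target s aug pvTemplatePrefixes
    if target ≤ (aug'.length : Int) then aug' else pvForSents target aug' ss

-- 'while len(augmented) < target:' — fuel only makes the loop total; under Pre_ each pass adds
-- at least one element, so target.toNat + 1 passes always suffice.
def pvWhile (base : List String) (target : Int) : Nat → List String → List String
  | 0, aug => aug
  | f + 1, aug =>
    if (aug.length : Int) < target then pvWhile base target f (pvForSents target aug base) else aug

def augment_sentences (base_sentences : List String) (target : Int) : List String :=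
  PySem.List.slice (pvWhile base_sentences target (target.toNat + 1) []) none (some target)

-- ===== PORT B =====
def augment_sentences_alt (base_sentences : List String) (target : Int) : List String :=
  let combos := base_sentences.flatMap (fun s => pvTemplatePrefixes.map (fun t => pvFmt t s))
  if target ≤ 0 ∨ combos = [] then []
  else
    let reps := -(PySem.Int.floordiv (-target) (combos.length : Int))
    PySem.List.slice (List.flatten (List.replicate reps.toNat combos)) none (some target)

-- ===== PRECONDITION & SPEC =====
-- Pre_ excludes only empty base_sentences with positive target, where A's while loop never
-- terminates (no value is returned).
def Pre_augment_sentences (base_sentences : List String) (target : Int) : Prop :=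
  base_sentences ≠ [] ∨ target ≤ 0
instance (base_sentences : List String) (target : Int) : Decidable (Pre_augment_sentences base_sentences target) := by unfold Pre_augment_sentences; infer_instance

def pvWitness_augment_sentences : List String × Int := (["hello"], 3)

def Spec_augment_sentences (base_sentences : List String) (target : Int) (out : List String) : Prop := out = augment_sentences_alt base_sentences target
instance (base_sentences : List String) (target : Int) (out : List String) : Decidable (Spec_augment_sentences base_sentences target out) := by unfold Spec_augment_sentences; infer_instance

-- ===== CLAIM (what is proved, stated in full; the proofs are below) =====
def Claim_equal_augment_sentences : Prop := ∀ (base_sentences : List String) (target : Int), Dom_augment_sentences base_sentences target → Pre_augment_sentences base_sentences target → Spec_augment_sentences base_sentences target (augment_sentences base_sentences target)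

-- ===== LEMMAS AND PROOFS =====

theorem pvForTemplates_eq (target : Int) (sent : String) (ts : List String) :
    ∀ aug : List String, (aug.length : Int) < target →
      pvForTemplates target sent aug ts
        = aug ++ (ts.map (fun t => pvFmt t sent)).take (target - aug.length).toNat := by
  induction ts with
  | nil => intro aug _; simp [pvForTemplates]
  | cons t ts ih =>
    intro aug h
    simp only [pvForTemplates, List.map_cons]
    by_cases hb : target ≤ ((aug ++ [pvFmt t sent]).length : Int)
    · have hlen : (aug ++ [pvFmt t sent]).length = aug.length + 1 := by simp
      rw [if_pos hb]
      have h1 : (target - (aug.length : Int)).toNat = 1 := by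
        rw [hlen] at hb; push_cast at hb; omega
      rw [h1, List.take_succ_cons, List.take_zero]
    · rw [if_neg hb]
      have hlen : ((aug ++ [pvFmt t sent]).length : Int) = (aug.length : Int) + 1 := by
        simp
      have h' : ((aug ++ [pvFmt t sent]).length : Int) < target := by omega
      rw [ih _ h']
      have hd : (target - (aug.length : Int)).toNat
          = (target - ((aug ++ [pvFmt t sent]).length : Int)).toNat + 1 := by
        rw [hlen]; omega
      rw [hd, List.take_succ_cons]
      simp

theorem pvForSents_eq (target : Int) (ss : List String) :
    ∀ aug : List String, (aug.length : Int) < target →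
      pvForSents target aug ss
        = aug ++ ((ss.flatMap (fun s => pvTemplatePrefixes.map (fun t => pvFmt t s))).take
            (target - aug.length).toNat) := by
  induction ss with
  | nil => intro aug _; simp [pvForSents]
  | cons s ss ih =>
    intro aug h
    have hN : (pvTemplatePrefixes.map (fun t => pvFmt t s)).length = 25 := by
      simp [pvTemplatePrefixes]
    simp only [pvForSents, List.flatMap_cons]
    rw [pvForTemplates_eq target s pvTemplatePrefixes aug h]
    set d : Nat := (target - (aug.length : Int)).toNat with hdd
    have hd1 : 1 ≤ d := by omega
    have hdt : (aug.length : Int) + (d : Int) = target := by omega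
    have hlen : (aug ++ (pvTemplatePrefixes.map (fun t => pvFmt t s)).take d).length
        = aug.length + min d 25 := by simp [hN]
    by_cases hb : target ≤ ((aug ++ (pvTemplatePrefixes.map (fun t => pvFmt t s)).take d).length : Int)
    · rw [if_pos hb]
      rw [hlen] at hb; push_cast at hb
      have hdle : d ≤ 25 := by omega
      rw [List.take_append, hN]
      have : d - 25 = 0 := by omega
      rw [this, List.take_zero, List.append_nil]
    · rw [if_neg hb]
      rw [hlen] at hb; push_cast at hb
      have hlt : 25 < d := by omega
      have htk : (pvTemplatePrefixes.map (fun t => pvFmt t s)).take d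
          = pvTemplatePrefixes.map (fun t => pvFmt t s) := by
        apply List.take_of_length_le; omega
      rw [htk]
      have h' : ((aug ++ pvTemplatePrefixes.map (fun t => pvFmt t s)).length : Int) < target := by
        simp [hN]; omega
      have hd2 : (target - ((aug ++ pvTemplatePrefixes.map (fun t => pvFmt t s)).length : Int)).toNat
          = d - 25 := by simp [hN]; omega
      rw [ih _ h', hd2, List.append_assoc]
      congr 1
      rw [List.take_append, hN, htk]

theorem pvFlatRepLen (c : List String) (k : Nat) :
    (List.flatten (List.replicate k c)).length = k * c.length := by
  induction k with
  | zero => simp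
  | succ k ih => simp [List.replicate_succ, ih, Nat.succ_mul]; omega

-- take d of a tiling does not depend on the number of tiles once k tiles cover d
theorem pvTakeTiles (c : List String) (d k m : Nat) (h : d ≤ k * c.length) :
    (List.flatten (List.replicate (k + m) c)).take d
      = (List.flatten (List.replicate k c)).take d := by
  rw [List.replicate_add, List.flatten_append]
  exact List.take_append_of_le_length (by rw [pvFlatRepLen]; omega)

theorem pvTakeTiles' (c : List String) (d k₁ k₂ : Nat)
    (h1 : d ≤ k₁ * c.length) (h2 : d ≤ k₂ * c.length) :
    (List.flatten (List.replicate k₁ c)).take d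
      = (List.flatten (List.replicate k₂ c)).take d := by
  rcases Nat.le_total k₁ k₂ with hle | hle
  · rw [← Nat.add_sub_cancel' hle] at *
    exact (pvTakeTiles c d k₁ (k₂ - k₁) h1).symm
  · rw [← Nat.add_sub_cancel' hle] at *
    exact pvTakeTiles c d k₂ (k₁ - k₂) h2

theorem pvWhile_eq (base : List String) (target : Int) (hb : base ≠ []) :
    ∀ (f : Nat) (aug : List String), (aug.length : Int) < target →
      (target - aug.length).toNat ≤ f →
      pvWhile base target f aug
        = aug ++ (List.flatten (List.replicate (target - aug.length).toNat
            (base.flatMap (fun s => pvTemplatePrefixes.map (fun t => pvFmt t s))))).take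
            (target - aug.length).toNat := by
  intro f
  induction f with
  | zero => intro aug h hf; omega
  | succ f ih =>
    intro aug h hf
    set c : List String := base.flatMap (fun s => pvTemplatePrefixes.map (fun t => pvFmt t s)) with hc
    have hn : 25 ≤ c.length := by
      cases base with
      | nil => exact absurd rfl hb
      | cons b bs => simp [hc, List.flatMap_cons, pvTemplatePrefixes]
    set d : Nat := (target - (aug.length : Int)).toNat with hdd
    have hd1 : 1 ≤ d := by omega
    simp only [pvWhile, if_pos h]
    rw [pvForSents_eq target base aug h, ← hc, ← hdd]
    have hlen : (aug ++ c.take d).length = aug.length + min d c.length := by simp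
    by_cases hcase : d ≤ c.length
    · -- the pass reaches target; the loop then stops
      have hstop : ¬ ((aug ++ c.take d).length : Int) < target := by
        rw [hlen]; push_cast; omega
      have : pvWhile base target f (aug ++ c.take d) = aug ++ c.take d := by
        cases f with
        | zero => rfl
        | succ f => simp only [pvWhile, if_neg hstop]
      rw [this]
      congr 1
      -- take d of d tiles = take d of one tile = c.take d
      have hone : (List.flatten (List.replicate d c)).take d = c.take d := by
        have h1d : d ≤ 1 * c.length := by omega
        rw [pvTakeTiles' c d d 1 (Nat.le_mul_of_pos_right _ (by omega)) h1d]
        simp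
      exact hone.symm
    · -- full pass appended, loop continues
      push_neg at hcase
      have htk : c.take d = c := List.take_of_length_le (by omega)
      rw [htk]
      have h' : ((aug ++ c).length : Int) < target := by
        simp; omega
      have hd2 : (target - ((aug ++ c).length : Int)).toNat = d - c.length := by
        simp; omega
      have hf' : (target - ((aug ++ c).length : Int)).toNat ≤ f := by
        rw [hd2]; omega
      rw [ih _ h' hf', hd2, List.append_assoc]
      congr 1
      -- c ++ take (d - n) (tiles (d - n)) = take d (tiles d)
      have hrep : List.flatten (List.replicate d c) = c ++ List.flatten (List.replicate (d - 1) c) := by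
        have : d = (d - 1) + 1 := by omega
        rw [this]; simp [List.replicate_succ]
      rw [hrep, List.take_append, List.take_of_length_le (le_of_lt hcase)]
      congr 1
      apply pvTakeTiles' c (d - c.length) (d - c.length) (d - 1)
      · exact Nat.le_mul_of_pos_right _ (by omega)
      · have := Nat.le_mul_of_pos_right (d - 1) (show 0 < c.length by omega)
        omega

-- ===== VERDICT (by name: the statement is the Claim_ definition above) =====
theorem augment_sentences_spec : Claim_equal_augment_sentences := by
  intro base target _ hpre
  unfold Spec_augment_sentences augment_sentences augment_sentences_alt
  by_cases ht : target ≤ 0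
  · -- target ≤ 0: both return []
    have : target.toNat + 1 = 1 := by omega
    rw [this]
    have hg : ¬ (((([] : List String)).length : Int) < target) := by simp; omega
    simp only [pvWhile, if_neg hg, if_pos (Or.inl ht)]
    simp [PySem.List.slice]
  · push_neg at ht
    have hb : base ≠ [] := by
      rcases hpre with h | h
      · exact h
      · omega
    set c : List String := base.flatMap (fun s => pvTemplatePrefixes.map (fun t => pvFmt t s)) with hc
    have hn : 25 ≤ c.length := by
      cases base with
      | nil => exact absurd rfl hb
      | cons b bs => simp [hc, List.flatMap_cons, pvTemplatePrefixes]
    have hcne : ¬ (target ≤ 0 ∨ c = []) := by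
      push_neg
      exact ⟨ht, by intro h; rw [h] at hn; simp at hn⟩
    rw [if_neg hcne]
    set reps : Int := -(PySem.Int.floordiv (-target) (c.length : Int)) with hreps
    have hceil : (reps - 1) * (c.length : Int) < target ∧ target ≤ reps * (c.length : Int) :=
      (PySem.Int.neg_floordiv_neg_eq_iff_of_pos (a := target) (b := (c.length : Int))
        (by exact_mod_cast Nat.lt_of_lt_of_le (by norm_num) hn) (q := reps)).mp rfl
    have hrpos : 0 < reps := by
      by_contra hnp
      push_neg at hnp
      have : reps * (c.length : Int) ≤ 0 :=
        mul_nonpos_of_nonpos_of_nonneg hnp (by positivity)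
      omega
    set d : Nat := target.toNat with hdd
    have hd1 : 1 ≤ d := by omega
    have hg : ((([] : List String)).length : Int) < target := by simp; omega
    have hfuel : (target - (([] : List String).length : Int)).toNat ≤ target.toNat + 1 := by
      simp
    have hwl := pvWhile_eq base target hb (target.toNat + 1) [] hg hfuel
    simp only [List.length_nil, Nat.cast_zero, sub_zero, List.nil_append] at hwl
    rw [hwl, ← hc, ← hdd]
    -- both sides: slice … none (some target) with target = (d : Int)
    have htc : target = ((d : Nat) : Int) := by omega
    rw [htc, PySem.List.slice_to_natCast, PySem.List.slice_to_natCast]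
    rw [List.take_take, Nat.min_self]
    apply pvTakeTiles' c d d reps.toNat
    · exact Nat.le_mul_of_pos_right _ (by omega)
    · have h1 : ((reps.toNat * c.length : Nat) : Int) = reps * (c.length : Int) := by
        push_cast [Int.toNat_of_nonneg hrpos.le]
        ring
      have : (d : Int) ≤ ((reps.toNat * c.length : Nat) : Int) := by
        rw [h1]; omega
      exact_mod_cast this
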